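-- pv_equiv track=rewrite | github.com/13anjou/Research-Internship | Extraction/SlopeStudy.py | inverserPentes
-- ===== SOURCE A (Python) =====
-- def inverserPentes(pentes) :
--
-- 	res= list()
-- 	p=0
-- 	coef1 = True
-- 	for p in pentes :
--
-- 		if coef1:
-- 			coef1 = False
-- 			a=p
-- 		else :
-- 			coef1 = True
-- 			res= [a,p]+res
-- 	return(res)
-- ===== SOURCE B (Python) =====
-- def inverserPentes(pentes):
--     pairs = []
--     i = 0
--     while i + 1 < len(pentes):
--         pairs.append((pentes[i], pentes[i + 1]))
--         i += 2
--     out = []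
--     for a, b in reversed(pairs):
--         out.append(a)
--         out.append(b)
--     return out
-- ===== Notes on version B (the rewrite author's own statement) =====
-- stated objective: faster
-- what changed: Instead of prepending each completed pair to the front of the result ([a,p]+res, which copies the whole list each time), B collects the pairs in one pass and then emits them back-to-front with O(1) appends.
import Mathlib
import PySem

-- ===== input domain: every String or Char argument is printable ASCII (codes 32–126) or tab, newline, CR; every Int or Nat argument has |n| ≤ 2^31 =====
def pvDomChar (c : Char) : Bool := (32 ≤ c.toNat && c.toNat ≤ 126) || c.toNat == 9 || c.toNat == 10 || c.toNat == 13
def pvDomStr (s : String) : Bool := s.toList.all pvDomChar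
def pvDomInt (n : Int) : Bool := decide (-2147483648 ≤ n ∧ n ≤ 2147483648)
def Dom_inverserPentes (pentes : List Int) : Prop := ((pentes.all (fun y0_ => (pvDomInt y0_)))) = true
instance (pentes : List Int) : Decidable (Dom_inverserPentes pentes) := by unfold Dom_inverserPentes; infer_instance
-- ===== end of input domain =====

-- ===== PORT A =====
-- B is faster: it collects the pairs in one pass and emits them back-to-front with
-- appends, instead of A's repeated front-prepend [a,p]+res. Return value only (no mutation).
def inverserPentes (pentes : List Int) : List Int :=
  -- state (res, coef1, a); 'a' starts at 0 and is never read before being set, as in A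
  (pentes.foldl (fun (st : List Int × Bool × Int) p =>
    if st.2.1 then (st.1, false, p)
    else (st.2.2 :: p :: st.1, true, st.2.2)) ([], true, 0)).1  -- [a,p]+res

-- ===== PORT B =====
def pairUp : List Int → List (Int × Int)
  | a :: b :: t => (a, b) :: pairUp t
  | _ => []

def inverserPentes_alt (pentes : List Int) : List Int :=
  (pairUp pentes).reverse.foldl (fun out ab => out ++ [ab.1, ab.2]) []

-- ===== PRECONDITION & SPEC =====
def Spec_inverserPentes (pentes : List Int) (out : List Int) : Prop := out = inverserPentes_alt pentes
instance (pentes : List Int) (out : List Int) : Decidable (Spec_inverserPentes pentes out) := by unfold Spec_inverserPentes; infer_instance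

-- ===== CLAIM (what is proved, stated in full; the proofs are below) =====
def Claim_equal_inverserPentes : Prop := ∀ (pentes : List Int), Dom_inverserPentes pentes → Spec_inverserPentes pentes (inverserPentes pentes)

-- ===== LEMMAS AND PROOFS =====
theorem pv_emit (ps : List (Int × Int)) (acc : List Int) :
    ps.foldl (fun out ab => out ++ [ab.1, ab.2]) acc
      = acc ++ ps.flatMap (fun ab => [ab.1, ab.2]) := by
  induction ps generalizing acc with
  | nil => simp
  | cons ab t ih => simp [List.foldl_cons, ih]

theorem pv_aloop (l : List Int) (res : List Int) (x : Int) :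
    (l.foldl (fun (st : List Int × Bool × Int) p =>
        if st.2.1 then (st.1, false, p)
        else (st.2.2 :: p :: st.1, true, st.2.2)) (res, true, x)).1
      = (pairUp l).reverse.flatMap (fun ab => [ab.1, ab.2]) ++ res := by
  induction l using pairUp.induct generalizing res x with
  | case1 a b t ih =>
      simp [List.foldl_cons, pairUp, ih, List.flatMap_append]
  | case2 l h =>
      rcases l with _ | ⟨a, _ | ⟨b, t⟩⟩
      · simp [pairUp]
      · simp [pairUp]
      · exact absurd rfl (h a b t)

-- ===== VERDICT (by name: the statement is the Claim_ definition above) =====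
theorem inverserPentes_spec : Claim_equal_inverserPentes := by
  intro pentes _
  unfold Spec_inverserPentes inverserPentes inverserPentes_alt
  rw [pv_aloop, pv_emit]
  simp
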